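-- pv_equiv track=rewrite | github.com/Chirag8405/YojnaSetu | backend/ingestion/pdf_loader.py | _chunk_token_ids
-- ===== SOURCE A (Python) =====
-- from typing import Any, Dict, List
--
-- def _chunk_token_ids(token_ids: List[int], max_tokens: int, overlap: int) -> List[List[int]]:
--     """Split token ids into overlapping windows with deterministic boundaries."""
--
--     if max_tokens <= 0:
--         raise ValueError("max_tokens must be > 0")
--     if overlap < 0:
--         raise ValueError("overlap must be >= 0")
--     if overlap >= max_tokens:
--         raise ValueError("overlap must be smaller than max_tokens")
--
--     windows: List[List[int]] = []
--     step = max_tokens - overlap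
--     for start in range(0, len(token_ids), step):
--         window = token_ids[start : start + max_tokens]
--         if not window:
--             continue
--         windows.append(window)
--         if start + max_tokens >= len(token_ids):
--             break
--     return windows
-- ===== SOURCE B (Python) =====
-- from typing import List
--
-- def _chunk_token_ids(token_ids: List[int], max_tokens: int, overlap: int) -> List[List[int]]:
--     """Consume a shrinking suffix instead of indexing into the original list."""
--     if max_tokens <= 0:
--         raise ValueError("max_tokens must be > 0")
--     if overlap < 0:
--         raise ValueError("overlap must be >= 0")
--     if overlap >= max_tokens:
--         raise ValueError("overlap must be smaller than max_tokens")
--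
--     if not token_ids:
--         return []
--     step = max_tokens - overlap
--     windows: List[List[int]] = []
--     rest = token_ids
--     while len(rest) > max_tokens:
--         windows.append(rest[:max_tokens])
--         rest = rest[step:]
--     windows.append(rest)
--     return windows
-- ===== Notes on version B (the rewrite author's own statement) =====
-- stated objective: alternative
-- what changed: B consumes a shrinking suffix (rest = rest[step:]), keeping no index at all: the loop tests only the remaining length and the final short window is appended unconditionally after the loop, instead of A's indexed range(0,n,step) loop with an emptiness check and an early break.
import Mathlib
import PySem

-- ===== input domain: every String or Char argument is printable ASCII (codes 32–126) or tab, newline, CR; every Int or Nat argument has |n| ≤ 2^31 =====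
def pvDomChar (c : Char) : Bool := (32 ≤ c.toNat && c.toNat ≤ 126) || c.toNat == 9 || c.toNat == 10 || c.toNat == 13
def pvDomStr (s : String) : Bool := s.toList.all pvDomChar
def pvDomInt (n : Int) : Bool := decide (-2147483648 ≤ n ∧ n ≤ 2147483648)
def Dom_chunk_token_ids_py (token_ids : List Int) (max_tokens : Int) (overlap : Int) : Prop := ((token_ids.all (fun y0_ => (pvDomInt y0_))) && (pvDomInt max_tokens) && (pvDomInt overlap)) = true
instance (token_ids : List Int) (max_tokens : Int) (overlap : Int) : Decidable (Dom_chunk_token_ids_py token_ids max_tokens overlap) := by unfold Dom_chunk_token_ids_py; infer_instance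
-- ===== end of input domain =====

-- B replaces A's indexed range loop (with emptiness check and early break) by a loop that
-- consumes a shrinking suffix of the list, appending the final short window unconditionally
-- (objective: alternative decomposition; no speed claim).

-- ===== PORT A =====
-- the for-loop over range(0, len(token_ids), step) with the early break, acc = windows
def chunkLoopA (tks : List Int) (mt : Int) : List Int → List (List Int) → List (List Int)
  | [], acc => acc
  | start :: rest, acc =>
    let window := PySem.List.slice tks (some start) (some (start + mt))
    if window = [] then chunkLoopA tks mt rest acc
    else if start + mt ≥ (tks.length : Int) then acc ++ [window]
    else chunkLoopA tks mt rest (acc ++ [window])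

def chunk_token_ids_py (token_ids : List Int) (max_tokens : Int) (overlap : Int) : List (List Int) :=
  if max_tokens ≤ 0 then []            -- raise ValueError: excluded by Pre_
  else if overlap < 0 then []          -- raise ValueError: excluded by Pre_
  else if overlap ≥ max_tokens then [] -- raise ValueError: excluded by Pre_
  else
    chunkLoopA token_ids max_tokens
      (PySem.List.pyRange 0 token_ids.length (max_tokens - overlap)) []

-- ===== PORT B =====
-- the while-loop 'while len(rest) > max_tokens: windows.append(rest[:max_tokens]); rest = rest[step:]'
-- then 'windows.append(rest)', as structural recursion on the shrinking suffix.
-- sP is step-1 (B only runs the loop with step = max_tokens - overlap ≥ 1, so rest[step:] is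
-- exactly 'drop (sP+1)' and rest[:max_tokens] is exactly 'take mtN' with mtN = max_tokens ≥ 1).
def chunkGoB (mtN sP : Nat) (rest : List Int) : List (List Int) :=
  if mtN < rest.length then
    rest.take mtN :: chunkGoB mtN sP (rest.drop (sP + 1))
  else [rest]
termination_by rest.length
decreasing_by simp; omega

def chunk_token_ids_py_alt (token_ids : List Int) (max_tokens : Int) (overlap : Int) : List (List Int) :=
  if max_tokens ≤ 0 then []            -- raise ValueError: excluded by Pre_
  else if overlap < 0 then []          -- raise ValueError: excluded by Pre_
  else if overlap ≥ max_tokens then [] -- raise ValueError: excluded by Pre_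
  else if token_ids = [] then []
  else chunkGoB max_tokens.toNat ((max_tokens - overlap - 1).toNat) token_ids

-- ===== PRECONDITION & SPEC =====
-- Pre_ excludes exactly the inputs on which A raises ValueError (its three validation checks).
def Pre_chunk_token_ids_py (token_ids : List Int) (max_tokens : Int) (overlap : Int) : Prop :=
  0 < max_tokens ∧ 0 ≤ overlap ∧ overlap < max_tokens
instance (token_ids : List Int) (max_tokens : Int) (overlap : Int) : Decidable (Pre_chunk_token_ids_py token_ids max_tokens overlap) := by unfold Pre_chunk_token_ids_py; infer_instance

def pvWitness_chunk_token_ids_py : List Int × Int × Int := ([1, 2, 3, 4, 5], 2, 1)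

def Spec_chunk_token_ids_py (token_ids : List Int) (max_tokens : Int) (overlap : Int) (out : List (List Int)) : Prop := out = chunk_token_ids_py_alt token_ids max_tokens overlap
instance (token_ids : List Int) (max_tokens : Int) (overlap : Int) (out : List (List Int)) : Decidable (Spec_chunk_token_ids_py token_ids max_tokens overlap out) := by unfold Spec_chunk_token_ids_py; infer_instance

-- ===== CLAIM (what is proved, stated in full; the proofs are below) =====
def Claim_equal_chunk_token_ids_py : Prop := ∀ (token_ids : List Int) (max_tokens : Int) (overlap : Int), Dom_chunk_token_ids_py token_ids max_tokens overlap → Pre_chunk_token_ids_py token_ids max_tokens overlap → Spec_chunk_token_ids_py token_ids max_tokens overlap (chunk_token_ids_py token_ids max_tokens overlap)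

-- ===== LEMMAS AND PROOFS =====

lemma pyRange_pos_cons (a b s : Int) (hs : 0 < s) (hab : a < b) :
    PySem.List.pyRange a b s = a :: PySem.List.pyRange (a + s) b s := by
  rw [PySem.List.pyRange_of_pos _ _ hs, PySem.List.pyRange_of_pos _ _ hs]
  have hcnt : (if a < b then ((b - a + s - 1) / s).toNat else 0)
      = (if a + s < b then ((b - (a + s) + s - 1) / s).toNat else 0) + 1 := by
    rw [if_pos hab]
    by_cases h2 : a + s < b
    · rw [if_pos h2]
      have h1 : (b - a + s - 1) / s = (b - a - 1) / s + 1 := by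
        have h := Int.add_mul_ediv_right (b - a - 1) 1 (ne_of_gt hs)
        have harg2 : b - a + s - 1 = b - a - 1 + 1 * s := by ring
        rw [harg2, h]
      have h0 : 0 ≤ (b - a - 1) / s := Int.ediv_nonneg (by omega) (le_of_lt hs)
      have harg : b - (a + s) + s - 1 = b - a - 1 := by ring
      rw [harg, h1]
      omega
    · rw [if_neg h2]
      have h1 : (b - a + s - 1) / s = 1 := by
        have := (PySem.Int.floordiv_eq_iff_of_pos (a := b - a + s - 1) (b := s) (q := 1) hs)
        rw [PySem.Int.floordiv_eq_ediv_of_pos hs] at this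
        exact this.mpr (by constructor <;> nlinarith)
      rw [h1]
      rfl
  rw [hcnt, List.range_succ_eq_map, List.map_cons, List.map_map]
  congr 1
  · norm_num
  · congr 1
    funext k
    simp [Function.comp]
    ring

lemma window_eq_take (tks : List Int) (off mtN : Nat) :
    PySem.List.slice tks (some (off : Int)) (some ((off : Int) + (mtN : Int)))
      = (tks.drop off).take mtN :=
  PySem.List.slice_natCast_add tks off mtN

-- A's loop from offset 'off' equals B's suffix recursion on tks.drop off.
lemma loopA_eq_goB (tks : List Int) (mt step : Int) (hmt : 0 < mt) (hstep : 0 < step)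
    (hsm : step ≤ mt) :
    ∀ (k off : Nat) (acc : List (List Int)), tks.length - off = k → off < tks.length →
    chunkLoopA tks mt (PySem.List.pyRange (off : Int) (tks.length : Int) step) acc
      = acc ++ chunkGoB mt.toNat (step.toNat - 1) (tks.drop off) := by
  intro k
  induction k using Nat.strong_induction_on with
  | _ k ih =>
    intro off acc hk hoff
    have hofflt : (off : Int) < (tks.length : Int) := by exact_mod_cast hoff
    rw [pyRange_pos_cons (off : Int) tks.length step hstep hofflt]
    have hmteq : (off : Int) + mt = (off : Int) + (mt.toNat : Int) := by omega
    have hwin : PySem.List.slice tks (some (off : Int)) (some ((off : Int) + mt))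
        = (tks.drop off).take mt.toNat := by
      rw [hmteq]; exact window_eq_take tks off mt.toNat
    have hrestlen : (tks.drop off).length = tks.length - off := by simp
    have hrestne : (tks.drop off) ≠ [] := by
      intro h
      have := congrArg List.length h
      simp at this
      omega
    have hwne : PySem.List.slice tks (some (off : Int)) (some ((off : Int) + mt)) ≠ [] := by
      rw [hwin]
      intro h
      have := congrArg List.length h
      simp at this
      rcases this with h1 | h1
      · omega
      · exact hrestne (List.eq_nil_of_length_eq_zero (by omega))
    simp only [chunkLoopA, if_neg hwne]
    by_cases hbrk : (off : Int) + mt ≥ (tks.length : Int)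
    · rw [if_pos hbrk]
      have hle : ¬ (mt.toNat < (tks.drop off).length) := by omega
      rw [chunkGoB, if_neg hle]
      have htake : (tks.drop off).take mt.toNat = tks.drop off :=
        List.take_of_length_le (by omega)
      rw [hwin, htake]
    · rw [if_neg hbrk]
      have hnext : (off : Int) + step = ((off + step.toNat : Nat) : Int) := by
        push_cast; omega
      rw [hnext]
      have hoff' : off + step.toNat < tks.length := by omega
      have ih' := ih (tks.length - (off + step.toNat)) (by omega)
        (off + step.toNat) (acc ++ [PySem.List.slice tks (some (off : Int)) (some ((off : Int) + mt))])
        rfl hoff'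
      rw [ih']
      have hgt : mt.toNat < (tks.drop off).length := by omega
      have hsucc : step.toNat - 1 + 1 = step.toNat := by omega
      have hdrop : (tks.drop off).drop (step.toNat - 1 + 1) = tks.drop (off + step.toNat) := by
        rw [hsucc, List.drop_drop]
      conv_rhs => rw [chunkGoB]
      rw [if_pos hgt, hdrop, hwin]
      simp

theorem chunk_token_ids_py_eq_aux (token_ids : List Int) (max_tokens overlap : Int)
    (hpre : Pre_chunk_token_ids_py token_ids max_tokens overlap) :
    chunk_token_ids_py token_ids max_tokens overlap
      = chunk_token_ids_py_alt token_ids max_tokens overlap := by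
  obtain ⟨hmt, hov0, hovm⟩ := hpre
  unfold chunk_token_ids_py chunk_token_ids_py_alt
  rw [if_neg (by omega), if_neg (by omega), if_neg (by omega),
      if_neg (by omega), if_neg (by omega), if_neg (by omega)]
  have hstep : 0 < max_tokens - overlap := by omega
  by_cases hnil : token_ids = []
  · rw [if_pos hnil, hnil]
    rw [PySem.List.pyRange_of_pos _ _ hstep]
    simp [chunkLoopA]
  · rw [if_neg hnil]
    have hlen : 0 < token_ids.length := List.length_pos_iff.mpr hnil
    have h := loopA_eq_goB token_ids max_tokens (max_tokens - overlap) hmt hstep (by omega)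
      token_ids.length 0 [] (by omega) hlen
    simp only [Nat.cast_zero, List.drop_zero, List.nil_append] at h
    rw [h]
    congr 1
    omega

-- ===== VERDICT (by name: the statement is the Claim_ definition above) =====
theorem chunk_token_ids_py_spec : Claim_equal_chunk_token_ids_py := by
  intro token_ids max_tokens overlap _ hpre
  unfold Spec_chunk_token_ids_py
  exact chunk_token_ids_py_eq_aux token_ids max_tokens overlap hpre
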